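-- pv_equiv track=rewrite | github.com/yhu02/LIACS | year3/SWE/ngUML.component.backend/legacy/activity_model_extractor/pipeline.py | select_condition_avo_for_entailment
-- ===== SOURCE A (Python) =====
-- def select_condition_avo_for_entailment(avo_sents: list) -> list:
--     """Select all avo_sents that have a condition and create a set to predict the entailment.
--
--     Description:
--         Select all avo_sents if there is a condition tagged in them we consider it.
--         The goal of entailment is to specify how two or more conditions relate to one another.
--         So we only consider pairs of conditions.
--         If there is just one condition we don't consider it for entailment.
--
--     Args:
--         - avo_sents (list): all avo_sent results we will be searching through.
--
--     Returns:
--         - avo_cond_entail_sets (list): a list where each item consists of the current condition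
--             and the next condition.
--     """
--     avo_condition_ids = [
--         index for index, avo in enumerate(avo_sents) if avo["condition"]
--     ]
--     avo_cond_entail_sets = []
--     for index, avo_cond in enumerate(avo_condition_ids):
--         if index > 0:
--             avo_cond_entail_sets.append([avo_condition_ids[index - 1], avo_cond])
--     return avo_cond_entail_sets
-- ===== SOURCE B (Python) =====
-- def select_condition_avo_for_entailment(avo_sents: list) -> list:
--     """Single streaming pass: keep the index of the previous condition sentence
--     as running state instead of building an intermediate index list."""
--     avo_cond_entail_sets = []
--     prev = None
--     for index, avo in enumerate(avo_sents):
--         if avo["condition"]: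
--             if prev is not None:
--                 avo_cond_entail_sets.append([prev, index])
--             prev = index
--     return avo_cond_entail_sets
-- ===== Notes on version B (the rewrite author's own statement) =====
-- stated objective: simpler
-- what changed: Replaces the build-an-index-list-then-window-over-it two-pass structure with one streaming pass over enumerate(avo_sents) that keeps only the previous condition index as running state.
import Mathlib
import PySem

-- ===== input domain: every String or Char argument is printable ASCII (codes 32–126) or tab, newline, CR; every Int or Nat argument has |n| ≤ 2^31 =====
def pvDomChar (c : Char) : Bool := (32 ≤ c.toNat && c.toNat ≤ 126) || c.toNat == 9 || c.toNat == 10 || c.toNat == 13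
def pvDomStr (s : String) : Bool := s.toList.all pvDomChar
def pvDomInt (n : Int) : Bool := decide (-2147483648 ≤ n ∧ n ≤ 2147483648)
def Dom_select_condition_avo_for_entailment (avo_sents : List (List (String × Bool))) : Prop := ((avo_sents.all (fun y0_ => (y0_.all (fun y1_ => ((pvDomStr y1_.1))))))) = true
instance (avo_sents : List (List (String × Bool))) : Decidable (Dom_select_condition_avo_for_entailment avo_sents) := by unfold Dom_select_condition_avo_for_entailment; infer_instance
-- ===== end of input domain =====

-- B replaces A's two passes (index list, then window over it) with one streaming pass
-- keeping only the previous condition index as running state; same cost, simpler shape.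

-- avo["condition"] truthiness test shared by both Pythons (assoc-list first-match lookup;
-- the .getD false default is never reached inside Pre_, which requires the key present).
def pvCond (avo : List (String × Bool)) : Bool := (avo.lookup "condition").getD false

-- ===== PORT A =====
-- avo_condition_ids = [index for index, avo in enumerate(avo_sents) if avo["condition"]]
def pvIdsA (avo_sents : List (List (String × Bool))) : List Int :=
  ((PySem.List.enumerate avo_sents).filter (fun p => pvCond p.2)).map (·.1)

def select_condition_avo_for_entailment (avo_sents : List (List (String × Bool))) : List (List Int) :=
  let avo_condition_ids := pvIdsA avo_sents
  -- for index, avo_cond in enumerate(avo_condition_ids): if index > 0: append [ids[index-1], avo_cond]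
  (PySem.List.enumerate avo_condition_ids).foldl
    (fun acc p =>
      if p.1 > 0 then
        acc ++ [[(PySem.List.pyGet? avo_condition_ids (p.1 - 1)).getD 0, p.2]]
      else acc)
    []

-- ===== PORT B =====
def select_condition_avo_for_entailment_alt (avo_sents : List (List (String × Bool))) : List (List Int) :=
  ((PySem.List.enumerate avo_sents).foldl
    (fun (st : Option Int × List (List Int)) p =>
      if pvCond p.2 then
        (some p.1, match st.1 with
                   | some prev => st.2 ++ [[prev, p.1]]
                   | none => st.2)
      else st)
    (none, [])).2

-- ===== PRECONDITION & SPEC =====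
-- Pre_ excludes exactly the inputs where some sentence dict lacks the key "condition",
-- on which Python A (and B) raise KeyError.
def Pre_select_condition_avo_for_entailment (avo_sents : List (List (String × Bool))) : Prop :=
  (avo_sents.all (fun avo => avo.any (fun p => p.1 == "condition"))) = true
instance (avo_sents : List (List (String × Bool))) : Decidable (Pre_select_condition_avo_for_entailment avo_sents) := by unfold Pre_select_condition_avo_for_entailment; infer_instance

def pvWitness_select_condition_avo_for_entailment : (List (List (String × Bool))) :=
  [[("condition", true)], [("condition", false)], [("condition", true)]]

def Spec_select_condition_avo_for_entailment (avo_sents : List (List (String × Bool))) (out : List (List Int)) : Prop := out = select_condition_avo_for_entailment_alt avo_sents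
instance (avo_sents : List (List (String × Bool))) (out : List (List Int)) : Decidable (Spec_select_condition_avo_for_entailment avo_sents out) := by unfold Spec_select_condition_avo_for_entailment; infer_instance

-- ===== CLAIM (what is proved, stated in full; the proofs are below) =====
def Claim_equal_select_condition_avo_for_entailment : Prop := ∀ (avo_sents : List (List (String × Bool))), Dom_select_condition_avo_for_entailment avo_sents → Pre_select_condition_avo_for_entailment avo_sents → Spec_select_condition_avo_for_entailment avo_sents (select_condition_avo_for_entailment avo_sents)

-- ===== LEMMAS AND PROOFS =====

-- adjacent pairs of (p :: l)
def pvPairsP : Int → List Int → List (List Int)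
  | _, [] => []
  | p, a :: t => [p, a] :: pvPairsP a t

-- adjacent pairs of l, seeded by an optional previous element
def pvPairsO : Option Int → List Int → List (List Int)
  | some p, l => pvPairsP p l
  | none, [] => []
  | none, a :: t => pvPairsP a t

-- condition-tagged indices of xs, numbering from s
def pvIds (xs : List (List (String × Bool))) (s : Int) : List Int :=
  ((PySem.List.enumerate xs s).filter (fun p => pvCond p.2)).map (·.1)

theorem pvIds_nil (s : Int) : pvIds [] s = [] := by
  simp [pvIds, PySem.List.enumerate_nil]

theorem pvIds_cons (x : List (String × Bool)) (xs : List (List (String × Bool))) (s : Int) :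
    pvIds (x :: xs) s = if pvCond x then s :: pvIds xs (s + 1) else pvIds xs (s + 1) := by
  by_cases h : pvCond x <;> simp [pvIds, PySem.List.enumerate_cons, h]

theorem pvIdsA_eq (avo_sents : List (List (String × Bool))) : pvIdsA avo_sents = pvIds avo_sents 0 := rfl

-- B-side invariant: the fold over the tail, with running state (o, acc)
theorem auxB (xs : List (List (String × Bool))) : ∀ (s : Int) (o : Option Int) (acc : List (List Int)),
    ((PySem.List.enumerate xs s).foldl
      (fun (st : Option Int × List (List Int)) p =>
        if pvCond p.2 then
          (some p.1, match st.1 with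
                     | some prev => st.2 ++ [[prev, p.1]]
                     | none => st.2)
        else st)
      (o, acc)).2 = acc ++ pvPairsO o (pvIds xs s) := by
  induction xs with
  | nil =>
    intro s o acc
    simp only [PySem.List.enumerate_nil, List.foldl_nil, pvIds_nil]
    cases o <;> simp [pvPairsO, pvPairsP]
  | cons x xs ih =>
    intro s o acc
    rw [PySem.List.enumerate_cons]
    by_cases hc : pvCond x
    · simp only [List.foldl_cons, hc, if_pos, pvIds_cons]
      rw [ih]
      cases o with
      | none => cases pvIds xs (s + 1) <;> simp [pvPairsO, pvPairsP]
      | some p => cases pvIds xs (s + 1) <;> simp [pvPairsO, pvPairsP]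
    · simp only [List.foldl_cons, hc, Bool.false_eq_true, if_false, pvIds_cons]
      exact ih _ _ _

-- A-side invariant: the windowing fold over the suffix of the id list, index s ≥ 1,
-- with prev = l[s-1]
theorem auxA (l : List Int) : ∀ (t : List Int) (s : Nat) (acc : List (List Int)) (prev : Int),
    l.drop s = t → 0 < s → l[s - 1]? = some prev →
    (PySem.List.enumerate t (s : Int)).foldl
      (fun acc p =>
        if p.1 > 0 then acc ++ [[(PySem.List.pyGet? l (p.1 - 1)).getD 0, p.2]] else acc)
      acc = acc ++ pvPairsP prev t := by
  intro t
  induction t with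
  | nil => intro s acc prev _ _ _; simp [PySem.List.enumerate_nil, pvPairsP]
  | cons a t ih =>
    intro s acc prev hdrop hs hprev
    rw [PySem.List.enumerate_cons, List.foldl_cons]
    have hpos : ((s : Int) > 0) := by exact_mod_cast hs
    rw [if_pos hpos]
    have hcast : (s : Int) - 1 = ((s - 1 : Nat) : Int) := by omega
    have hget : PySem.List.pyGet? l ((s : Int) - 1) = some prev := by
      rw [hcast, PySem.List.pyGet?_natCast, hprev]
    rw [hget]
    have hdrop' : l.drop (s + 1) = t := by
      have := congrArg List.tail hdrop
      simpa [List.tail_drop] using this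
    have ha : l[s]? = some a := by
      have h0 : (l.drop s)[0]? = l[s + 0]? := List.getElem?_drop
      rw [hdrop] at h0
      simpa using h0.symm
    have hstep := ih (s + 1) (acc ++ [[prev, a]]) a hdrop' (by omega) (by simpa using ha)
    simp only [Option.getD_some]
    rw [show ((s : Int) + 1) = ((s + 1 : Nat) : Int) by push_cast; ring]
    rw [hstep]
    simp [pvPairsP]

theorem A_eq (avo_sents : List (List (String × Bool))) :
    select_condition_avo_for_entailment avo_sents = pvPairsO none (pvIds avo_sents 0) := by
  cases h : pvIds avo_sents 0 with
  | nil =>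
    simp [select_condition_avo_for_entailment, pvIdsA_eq, h, PySem.List.enumerate_nil, pvPairsO]
  | cons a t =>
    simp only [select_condition_avo_for_entailment, pvIdsA_eq, h]
    rw [PySem.List.enumerate_cons, List.foldl_cons]
    rw [if_neg (by omega : ¬ ((0 : Int), a).1 > 0)]
    rw [show ((0 : Int) + 1) = ((1 : Nat) : Int) by norm_num]
    rw [auxA (a :: t) t 1 [] a (by simp) (by omega) (by simp)]
    simp [pvPairsO]

theorem B_eq (avo_sents : List (List (String × Bool))) :
    select_condition_avo_for_entailment_alt avo_sents = pvPairsO none (pvIds avo_sents 0) := by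
  unfold select_condition_avo_for_entailment_alt
  rw [auxB avo_sents 0 none []]
  simp

-- ===== VERDICT (by name: the statement is the Claim_ definition above) =====
theorem select_condition_avo_for_entailment_spec : Claim_equal_select_condition_avo_for_entailment := by
  intro avo_sents _ _
  unfold Spec_select_condition_avo_for_entailment
  rw [A_eq, B_eq]
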